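-- pv_equiv track=rewrite | github.com/nhdewitt/codewars-kata | Python/7 kyu/very_even_numbers.py | is_very_even_number
-- ===== SOURCE A (Python) =====
-- def is_very_even_number(n):
--     if n < 10:
--         if n % 2 == 0:
--             return True
--         return False
--     while sum(int(n) for n in str(n)) >= 10:
--         n = sum(int(n) for n in str(n))
--     return True if sum(int(n) for n in str(n)) % 2 == 0 else False
-- ===== SOURCE B (Python) =====
-- def is_very_even_number(n):
--     if n < 10:
--         return n % 2 == 0
--     # digital root in closed form instead of repeated digit-sum passes
--     return (1 + (n - 1) % 9) % 2 == 0
-- ===== Notes on version B (the rewrite author's own statement) =====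
-- stated objective: simpler
-- what changed: Replaces the repeated string-conversion digit-sum while loop with the closed-form digital-root formula, leaving no loop at all.
import Mathlib
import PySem

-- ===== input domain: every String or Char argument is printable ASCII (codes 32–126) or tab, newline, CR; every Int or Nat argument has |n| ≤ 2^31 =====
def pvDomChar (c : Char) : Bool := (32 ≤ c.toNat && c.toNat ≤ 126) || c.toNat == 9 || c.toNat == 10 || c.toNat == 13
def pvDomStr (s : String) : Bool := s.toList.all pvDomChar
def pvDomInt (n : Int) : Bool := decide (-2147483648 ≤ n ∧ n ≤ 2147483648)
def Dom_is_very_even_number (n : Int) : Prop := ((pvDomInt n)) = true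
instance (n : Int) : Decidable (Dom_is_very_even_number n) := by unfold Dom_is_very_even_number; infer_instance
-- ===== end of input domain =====

-- B replaces A's repeated digit-sum while loop by the closed-form digital-root formula (simpler: no loop, no string conversion).

-- ===== PORT A =====
-- int(ch) for one character of str(n); the getD 0 default is unreachable: inside A's loop n ≥ 10, so every character is a digit
def pvCharVal (c : Char) : Int := (PySem.Int.ofChars? [c]).getD 0

-- sum(int(c) for c in str(n))
def pvDigSum (m : Int) : Int := ((PySem.Int.toChars m).map pvCharVal).sum

-- the while loop; fuel only makes the recursion total (n.natAbs iterations always suffice, proved below)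
def pvLoop : Nat → Int → Int
  | 0, m => m
  | fuel+1, m => if 10 ≤ pvDigSum m then pvLoop fuel (pvDigSum m) else m

def is_very_even_number (n : Int) : Bool :=
  if n < 10 then
    decide (PySem.Int.mod n 2 = 0)
  else
    decide (PySem.Int.mod (pvDigSum (pvLoop n.natAbs n)) 2 = 0)

-- ===== PORT B =====
def is_very_even_number_alt (n : Int) : Bool :=
  if n < 10 then
    decide (PySem.Int.mod n 2 = 0)
  else
    decide (PySem.Int.mod (1 + PySem.Int.mod (n - 1) 9) 2 = 0)

-- ===== PRECONDITION & SPEC =====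
def Spec_is_very_even_number (n : Int) (out : Bool) : Prop := out = is_very_even_number_alt n
instance (n : Int) (out : Bool) : Decidable (Spec_is_very_even_number n out) := by unfold Spec_is_very_even_number; infer_instance

-- ===== CLAIM (what is proved, stated in full; the proofs are below) =====
def Claim_equal_is_very_even_number : Prop := ∀ (n : Int), Dom_is_very_even_number n → Spec_is_very_even_number n (is_very_even_number n)

-- ===== LEMMAS AND PROOFS =====

-- pvCharVal of a digit character is the digit
lemma pvCharVal_digitChar (d : Nat) (h : d < 10) : pvCharVal (Nat.digitChar d) = (d : Int) := by
  interval_cases d <;> decide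

-- summing pvCharVal over Nat.toDigitsCore is the digit sum
lemma pvCharVal_toDigitsCore (fuel : Nat) : ∀ (n : Nat) (acc : List Char), n < fuel →
    ((Nat.toDigitsCore 10 fuel n acc).map pvCharVal).sum
      = ((Nat.digits 10 n).sum : Int) + (acc.map pvCharVal).sum := by
  induction fuel with
  | zero => intro n acc h; omega
  | succ f ih =>
    intro n acc h
    rw [Nat.toDigitsCore]
    by_cases h0 : n / 10 = 0
    · have hn : n < 10 := by omega
      simp only [h0]
      rw [if_pos trivial]
      rcases Nat.eq_zero_or_pos n with rfl | hpos
      · simp [pvCharVal_digitChar 0 (by norm_num)]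
      · rw [Nat.digits_def' (by norm_num : 1 < 10) hpos, Nat.div_eq_of_lt hn]
        simp only [List.map_cons, List.sum_cons,
          pvCharVal_digitChar (n % 10) (Nat.mod_lt _ (by norm_num)), Nat.digits_zero,
          List.sum_nil]
        push_cast
        omega
    · rw [if_neg h0]
      have hrec : n / 10 < f := by omega
      rw [ih (n / 10) _ hrec]
      have hpos : 0 < n := by omega
      rw [Nat.digits_def' (by norm_num : 1 < 10) hpos]
      simp [pvCharVal_digitChar (n % 10) (Nat.mod_lt _ (by norm_num))]
      omega

-- pvDigSum of a nonnegative integer is its decimal digit sum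
lemma pvDigSum_coe (k : Nat) : pvDigSum (k : Int) = ((Nat.digits 10 k).sum : Int) := by
  have : PySem.Int.toChars (k : Int) = Nat.toDigits 10 k := by
    simp [PySem.Int.toChars]
  rw [pvDigSum, this, Nat.toDigits]
  rw [pvCharVal_toDigitsCore (k + 1) k [] (by omega)]
  simp

lemma digitsum_le (k : Nat) : (Nat.digits 10 k).sum ≤ k := by
  induction k using Nat.strong_induction_on with
  | _ k ih =>
    rcases Nat.eq_zero_or_pos k with rfl | hpos
    · simp
    · rw [Nat.digits_def' (by norm_num : 1 < 10) hpos]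
      have := ih (k / 10) (by omega)
      simp only [List.sum_cons]
      omega

lemma digitsum_lt (k : Nat) (h : 10 ≤ k) : (Nat.digits 10 k).sum < k := by
  rw [Nat.digits_def' (by norm_num : 1 < 10) (by omega)]
  have := digitsum_le (k / 10)
  simp only [List.sum_cons]
  omega

lemma digitsum_pos (k : Nat) (h : 1 ≤ k) : 1 ≤ (Nat.digits 10 k).sum := by
  induction k using Nat.strong_induction_on with
  | _ k ih =>
    rw [Nat.digits_def' (by norm_num : 1 < 10) (by omega)]
    by_cases h0 : k / 10 = 0
    · simp only [List.sum_cons, h0, Nat.digits_zero, List.sum_nil]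
      omega
    · have := ih (k / 10) (by omega) (by omega)
      simp only [List.sum_cons]
      omega

lemma digitsum_mod9 (k : Nat) : (Nat.digits 10 k).sum % 9 = k % 9 :=
  ((Nat.modEq_nine_digits_sum k).symm : _)

-- the loop, run with enough fuel, reaches a value whose digit sum is the digital root
lemma pvLoop_spec (fuel : Nat) : ∀ (k : Nat), 1 ≤ k → k ≤ fuel →
    ∃ r : Nat, pvLoop fuel (k : Int) = (r : Int) ∧ 1 ≤ r ∧
      (Nat.digits 10 r).sum < 10 ∧ (Nat.digits 10 r).sum % 9 = k % 9 := by
  induction fuel with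
  | zero => intro k h1 h2; omega
  | succ f ih =>
    intro k h1 h2
    rw [pvLoop, pvDigSum_coe]
    by_cases hds : 10 ≤ (Nat.digits 10 k).sum
    · rw [if_pos (by exact_mod_cast hds)]
      have hle := digitsum_le k
      have hlt := digitsum_lt k (by omega)
      obtain ⟨r, hr, hr1, hr2, hr3⟩ := ih ((Nat.digits 10 k).sum) (by omega) (by omega)
      exact ⟨r, hr, hr1, hr2, by rw [hr3, digitsum_mod9]⟩
    · rw [if_neg (by exact_mod_cast hds)]
      exact ⟨k, rfl, h1, by omega, digitsum_mod9 k⟩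

-- ===== VERDICT (by name: the statement is the Claim_ definition above) =====
theorem is_very_even_number_spec : Claim_equal_is_very_even_number := by
  intro n _
  unfold Spec_is_very_even_number is_very_even_number is_very_even_number_alt
  by_cases hlt : n < 10
  · simp [hlt]
  · rw [if_neg hlt, if_neg hlt]
    have hn : (10 : Int) ≤ n := by omega
    set k : Nat := n.toNat with hk
    have hnk : n = (k : Int) := by omega
    have hk10 : 10 ≤ k := by omega
    obtain ⟨r, hr, hr1, hr2, hr3⟩ := pvLoop_spec k k (by omega) le_rfl
    have hmod : PySem.Int.mod ((k : Int) - 1) 9 = (((k - 1) % 9 : Nat) : Int) := by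
      rw [PySem.Int.mod_eq_emod_of_pos (by norm_num)]
      omega
    have hrpos := digitsum_pos r hr1
    have hval : (Nat.digits 10 r).sum = 1 + (k - 1) % 9 := by omega
    have key : pvDigSum (pvLoop k (k : Int)) = 1 + PySem.Int.mod ((k : Int) - 1) 9 := by
      rw [hr, pvDigSum_coe, hmod, hval]
      push_cast
      ring
    rw [hnk]
    simp only [Int.natAbs_natCast, key]
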